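-- pv_equiv track=rewrite | github.com/Sravani722/opensource | visaa_prep/prob_26.py | f
-- ===== SOURCE A (Python) =====
-- def f(a):
--     b=[]
--     ls=0
--     rs=0
--     for i in range(len(a)):
--         ls=sum(a[:i])
--         rs=sum(a[i+1:])
--         b.append(abs(ls-rs))
--     return " ".join(map(str,b))
-- ===== SOURCE B (Python) =====
-- def f(a):
--     total = sum(a)
--     ls = 0
--     out = []
--     for x in a:
--         out.append(abs(2 * ls + x - total))
--         ls += x
--     return " ".join(map(str, out))
-- ===== Notes on version B (the rewrite author's own statement) =====
-- stated objective: faster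
-- what changed: Replaces the per-index slice-and-resum (sum(a[:i]), sum(a[i+1:]) inside the loop) with a single pass keeping a running left sum and the precomputed total, using right = total - left - x.
import Mathlib
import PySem

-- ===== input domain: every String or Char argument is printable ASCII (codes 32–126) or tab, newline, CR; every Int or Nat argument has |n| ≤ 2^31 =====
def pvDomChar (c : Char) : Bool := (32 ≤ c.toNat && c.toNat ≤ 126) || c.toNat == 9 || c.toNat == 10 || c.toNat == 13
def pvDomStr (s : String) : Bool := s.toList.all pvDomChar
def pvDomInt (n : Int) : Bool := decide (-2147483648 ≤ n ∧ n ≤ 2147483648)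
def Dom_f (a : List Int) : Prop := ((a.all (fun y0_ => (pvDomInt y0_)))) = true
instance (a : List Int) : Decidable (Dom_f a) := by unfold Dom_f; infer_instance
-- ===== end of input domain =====

-- B replaces A's per-index slice-and-resum with one pass over a running left sum and the total (right = total - left - x): O(n) instead of O(n^2).

-- ===== PORT A =====
def f (a : List Int) : String :=
  let b : List Int :=
    (PySem.List.pyRange 0 (a.length : Int) 1).foldl (fun b i =>
      let ls := (PySem.List.slice a none (some i)).sum
      let rs := (PySem.List.slice a (some (i + 1)) none).sum
      b ++ [|ls - rs|]) []
  PySem.Str.join " " (b.map PySem.Int.toStr)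

-- ===== PORT B =====
def f_alt (a : List Int) : String :=
  let total := a.sum
  let st := a.foldl (fun (st : Int × List Int) x =>
    (st.1 + x, st.2 ++ [|2 * st.1 + x - total|])) (0, [])
  PySem.Str.join " " (st.2.map PySem.Int.toStr)

-- ===== PRECONDITION & SPEC =====
def Spec_f (a : List Int) (out : String) : Prop := out = f_alt a
instance (a : List Int) (out : String) : Decidable (Spec_f a out) := by unfold Spec_f; infer_instance

-- ===== CLAIM (what is proved, stated in full; the proofs are below) =====
def Claim_equal_f : Prop := ∀ (a : List Int), Dom_f a → Spec_f a (f a)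

-- ===== LEMMAS AND PROOFS =====

-- B's loop, unrolled: the accumulated list is a map over indices of the remaining list.
theorem bfold (total : Int) :
    ∀ (l : List Int) (ls : Int) (acc : List Int),
      (l.foldl (fun (st : Int × List Int) x =>
        (st.1 + x, st.2 ++ [|2 * st.1 + x - total|])) (ls, acc)).2
      = acc ++ (List.range l.length).map
          (fun k => |2 * (ls + (l.take k).sum) + l.getD k 0 - total|) := by
  intro l
  induction l with
  | nil => simp
  | cons x l' ih =>
    intro ls acc
    simp only [List.foldl_cons, List.length_cons, List.range_succ_eq_map,
      List.map_cons, List.map_map]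
    rw [ih]
    simp only [List.take_zero, List.sum_nil, add_zero, List.getD_cons_zero,
      List.append_assoc, List.singleton_append]
    refine congrArg (acc ++ ·) (congrArg (List.cons _) ?_)
    apply List.map_congr_left
    intro k _
    simp only [Function.comp_apply, List.take_succ_cons, List.sum_cons,
      List.getD_cons_succ]
    ring_nf

theorem drop_sum_eq (a : List Int) (k : Nat) (hk : k < a.length) :
    (a.drop (k + 1)).sum = a.sum - (a.take k).sum - a.getD k 0 := by
  have h1 : a.take (k + 1) ++ a.drop (k + 1) = a := List.take_append_drop _ _
  have h2 : a.take (k + 1) = a.take k ++ [a.getD k 0] := by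
    rw [List.take_succ]
    congr 1
    rw [List.getElem?_eq_getElem hk]
    simp [List.getD, List.getElem?_eq_getElem hk]
  have h3 : a.sum = (a.take (k + 1)).sum + (a.drop (k + 1)).sum := by
    conv_lhs => rw [← h1]
    simp
  rw [h2] at h3
  simp at h3
  simp only [List.getD]
  omega

-- ===== VERDICT (by name: the statement is the Claim_ definition above) =====
theorem f_spec : Claim_equal_f := by
  intro a _
  unfold Spec_f f f_alt
  dsimp only
  rw [bfold]
  simp only [PySem.List.foldl_append_singleton_eq_map, List.nil_append]
  congr 2
  rw [PySem.List.pyRange_one]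
  simp only [sub_zero, Int.toNat_natCast, List.map_map]
  apply List.map_congr_left
  intro k hk
  have hk' : k < a.length := List.mem_range.mp hk
  simp only [Function.comp_apply, zero_add]
  have hc : ((k : Int) + 1) = ((k + 1 : Nat) : Int) := by push_cast; ring
  rw [PySem.List.slice_to_natCast, hc, PySem.List.slice_from_natCast,
    drop_sum_eq a k hk']
  ring_nf
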